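-- pv_equiv track=rewrite | github.com/neriabd/Natural-Language-Processing | Assignment 2/ex2.py | calc_unique_words
-- ===== SOURCE A (Python) =====
-- from collections import defaultdict
--
-- def calc_unique_words(train_set, test_set):
--     words_train_test = defaultdict(int)
--
--     for line in train_set:
--         for word, tag in line:
--             words_train_test[word] = words_train_test.get(word, 0) + 1
--
--     for line in test_set:
--         for word, tag in line:
--             words_train_test[word] = words_train_test.get(word, 0) + 1
--
--     return len(words_train_test), sum(words_train_test.values())
-- ===== SOURCE B (Python) =====
-- def calc_unique_words(train_set, test_set):
--     words = {word for line in train_set for word, tag in line}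
--     words |= {word for line in test_set for word, tag in line}
--     total = sum(len(line) for line in train_set) + sum(len(line) for line in test_set)
--     return len(words), total
-- ===== Notes on version B (the rewrite author's own statement) =====
-- stated objective: simpler
-- what changed: Replaced the per-word frequency dict (counts built word by word, then len + sum of values) with a set of words for uniqueness and a per-line len() sum for the total, so no per-word counts are ever maintained.
import Mathlib
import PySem

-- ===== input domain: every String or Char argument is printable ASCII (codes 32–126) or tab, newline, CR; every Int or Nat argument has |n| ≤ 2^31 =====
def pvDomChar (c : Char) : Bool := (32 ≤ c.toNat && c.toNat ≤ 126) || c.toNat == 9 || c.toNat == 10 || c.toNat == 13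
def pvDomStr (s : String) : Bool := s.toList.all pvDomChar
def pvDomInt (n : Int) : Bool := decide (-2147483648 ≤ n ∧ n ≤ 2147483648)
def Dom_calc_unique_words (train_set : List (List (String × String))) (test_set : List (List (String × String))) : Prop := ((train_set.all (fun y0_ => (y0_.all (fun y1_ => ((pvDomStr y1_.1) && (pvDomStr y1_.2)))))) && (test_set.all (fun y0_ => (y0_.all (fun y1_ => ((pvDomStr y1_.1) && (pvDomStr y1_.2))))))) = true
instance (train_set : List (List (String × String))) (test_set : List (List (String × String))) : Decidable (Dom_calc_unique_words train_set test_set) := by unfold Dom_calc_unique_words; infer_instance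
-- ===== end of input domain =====

-- B replaces the per-word frequency dict with a set of words (uniqueness) plus a sum of line lengths (total); same values, simpler.
-- ===== PORT A =====
def calc_unique_words (train_set : List (List (String × String))) (test_set : List (List (String × String))) : Int × Int :=
  let words_train_test : PySem.Dict String Int :=
    train_set.foldl (fun d line =>
      line.foldl (fun d wt => d.insert wt.1 (d.getD wt.1 0 + 1)) d) PySem.Dict.empty
  let words_train_test :=
    test_set.foldl (fun d line =>
      line.foldl (fun d wt => d.insert wt.1 (d.getD wt.1 0 + 1)) d) words_train_test
  (PySem.Dict.size words_train_test, words_train_test.values.sum)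

-- ===== PORT B =====
def calc_unique_words_alt (train_set : List (List (String × String))) (test_set : List (List (String × String))) : Int × Int :=
  let words : PySem.Set String :=
    PySem.Set.ofList (train_set.flatMap (fun line => line.map (·.1)))
  let words :=
    PySem.Set.union words (PySem.Set.ofList (test_set.flatMap (fun line => line.map (·.1))))
  let total : Int :=
    (train_set.map (fun line => PySem.List.len line)).sum +
    (test_set.map (fun line => PySem.List.len line)).sum
  (PySem.Set.len words, total)

-- ===== PRECONDITION & SPEC =====
def Spec_calc_unique_words (train_set : List (List (String × String))) (test_set : List (List (String × String))) (out : Int × Int) : Prop := out = calc_unique_words_alt train_set test_set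
instance (train_set : List (List (String × String))) (test_set : List (List (String × String))) (out : Int × Int) : Decidable (Spec_calc_unique_words train_set test_set out) := by unfold Spec_calc_unique_words; infer_instance

-- ===== CLAIM (what is proved, stated in full; the proofs are below) =====
def Claim_equal_calc_unique_words : Prop := ∀ (train_set : List (List (String × String))) (test_set : List (List (String × String))), Dom_calc_unique_words train_set test_set → Spec_calc_unique_words train_set test_set (calc_unique_words train_set test_set)

-- ===== LEMMAS AND PROOFS =====

-- A's nested loops over both datasets fold the flat word list into a counter.
theorem dict_eq_counter (train_set test_set : List (List (String × String))) :
    test_set.foldl (fun d line =>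
      line.foldl (fun d wt => d.insert wt.1 (d.getD wt.1 0 + 1)) d)
      (train_set.foldl (fun d line =>
        line.foldl (fun d wt => d.insert wt.1 (d.getD wt.1 0 + 1)) d) PySem.Dict.empty)
    = PySem.Dict.counter (((train_set ++ test_set).flatten).map (·.1)) := by
  rw [← List.foldl_append, ← List.foldl_flatten,
    ← PySem.Dict.foldl_insert_getD_add_one_eq_counter]
  simp only [List.foldl_map]

-- sum over the distinct words of their counts = the word total
theorem sum_counts (ws : List String) :
    ((PySem.Set.ofList ws).map (fun k => (ws.count k : Int))).sum = (ws.length : Int) := by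
  have hperm : List.Perm (PySem.Set.ofList ws) ws.dedup := by
    rw [List.perm_ext_iff_of_nodup (PySem.Set.nodup_ofList ws) ws.nodup_dedup]
    intro a
    rw [PySem.Set.mem_ofList, List.mem_dedup]
  rw [(hperm.map (fun k => (ws.count k : Int))).sum_eq]
  have h2 : (ws.dedup.map fun k => (ws.count k : Int)).sum
      = ((ws.dedup.map fun k => ws.count k).sum : Int) := by
    push_cast
    rw [List.map_map]
    rfl
  rw [h2, List.sum_map_count_dedup_eq_length]

-- set(train words) | set(test words) = set of all words, as built lists
theorem union_ofList_ofList {α : Type} [BEq α] [LawfulBEq α] (a b : List α) :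
    PySem.Set.union (PySem.Set.ofList a) (PySem.Set.ofList b)
      = PySem.Set.ofList (a ++ b) := by
  rw [PySem.Set.ofList_append]
  show PySem.Set.update (PySem.Set.ofList a) (PySem.Set.ofList b)
      = PySem.Set.update (PySem.Set.ofList a) b
  rw [PySem.Set.update_eq_append_filter, PySem.Set.update_eq_append_filter,
    PySem.Set.ofList_ofList]

-- the two word lists are the same
theorem words_flatten_eq (train_set test_set : List (List (String × String))) :
    ((train_set ++ test_set).flatten).map (fun wt : String × String => wt.1)
      = train_set.flatMap (fun line => line.map (·.1))
        ++ test_set.flatMap (fun line => line.map (·.1)) := by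
  simp [List.flatMap_def, List.map_flatten]

-- ===== VERDICT (by name: the statement is the Claim_ definition above) =====
theorem calc_unique_words_spec : Claim_equal_calc_unique_words := by
  intro train_set test_set _
  unfold Spec_calc_unique_words calc_unique_words calc_unique_words_alt
  dsimp only
  rw [dict_eq_counter, union_ofList_ofList, ← words_flatten_eq]
  refine Prod.ext ?_ ?_
  · -- unique count: dict size = set size
    show (PySem.Dict.size (PySem.Dict.counter _) : Int) = (PySem.Set.len _ : Int)
    have hk := PySem.Dict.keys_counter
      (((train_set ++ test_set).flatten).map (fun wt : String × String => wt.1))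
    have : (PySem.Dict.counter (((train_set ++ test_set).flatten).map (fun wt : String × String => wt.1))).keys.length
        = (PySem.Set.ofList (((train_set ++ test_set).flatten).map (fun wt : String × String => wt.1))).length := by
      rw [hk]
    simpa [PySem.Dict.size, PySem.Dict.keys, PySem.Set.len] using this
  · -- total: sum of counts = number of words = sum of line lengths
    show (PySem.Dict.counter _).values.sum = _
    rw [PySem.Dict.values_eq_map_keys _ (PySem.Dict.nodup_keys_counter _) 0,
      PySem.Dict.keys_counter]
    rw [List.map_congr_left (fun k _ => PySem.Dict.getD_counter _ k), sum_counts]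
    simp [PySem.List.len_eq, List.length_flatten, List.map_map, Function.comp_def]
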